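-- pv_equiv track=rewrite | github.com/spxis/inkyframe | main.py | measure_bitmap_text
-- ===== SOURCE A (Python) =====
-- def measure_bitmap_text(text, font_map, spacing=2):
--     if not font_map:
--         return 0
--     total = 0
--     for i, ch in enumerate(text):
--         glyph = font_map.get(ch)
--         if not glyph:
--             continue
--         total += glyph["w"]
--         if i < len(text) - 1:
--             total += spacing
--     return total
-- ===== SOURCE B (Python) =====
-- def measure_bitmap_text(text, font_map, spacing=2):
--     # Traverse the glyph table, not the text: each glyph contributes its width
--     # times its number of occurrences, plus spacing per occurrence before the
--     # last position.
--     if not font_map: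
--         return 0
--     body, last = text[:-1], text[-1:]
--     total = 0
--     for ch, glyph in font_map.items():
--         if len(ch) != 1 or not glyph:
--             continue
--         n_body = body.count(ch)
--         n_last = last.count(ch)
--         if n_body or n_last:
--             total += glyph["w"] * (n_body + n_last) + spacing * n_body
--     return total
-- ===== Notes on version B (the rewrite author's own statement) =====
-- stated objective: alternative
-- what changed: Inverts the traversal: instead of scanning the text once and looking each character up in the font map, B iterates over the font map's glyph entries and multiplies each glyph's width (plus spacing) by the number of occurrences of that character in text[:-1] and in the final character, summing per-glyph contributions.
import Mathlib
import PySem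

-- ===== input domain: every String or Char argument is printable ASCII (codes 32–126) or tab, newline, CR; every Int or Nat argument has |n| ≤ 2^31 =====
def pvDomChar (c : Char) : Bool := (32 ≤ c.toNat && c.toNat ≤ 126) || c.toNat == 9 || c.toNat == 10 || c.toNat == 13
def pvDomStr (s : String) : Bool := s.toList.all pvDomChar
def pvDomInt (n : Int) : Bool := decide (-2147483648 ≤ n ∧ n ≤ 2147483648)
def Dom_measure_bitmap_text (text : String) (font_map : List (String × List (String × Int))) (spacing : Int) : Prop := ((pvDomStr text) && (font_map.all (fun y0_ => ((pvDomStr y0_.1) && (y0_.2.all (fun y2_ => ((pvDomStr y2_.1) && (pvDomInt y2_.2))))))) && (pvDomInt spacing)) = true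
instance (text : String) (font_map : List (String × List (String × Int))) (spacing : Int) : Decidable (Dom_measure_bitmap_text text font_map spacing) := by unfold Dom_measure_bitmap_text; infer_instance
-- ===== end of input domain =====

-- One honest line: B inverts the traversal — it iterates over the font map's glyph
-- entries and multiplies each glyph's width (plus spacing) by the character's
-- occurrence counts in text[:-1] and text[-1:], instead of scanning the text with
-- an interleaved accumulator; objective: alternative.

-- ===== PORT A =====
-- the loop body of A's `for i, ch in enumerate(text)` (n = len(text), constant in the loop)
def mbStepA (font_map : List (String × List (String × Int))) (spacing n : Int)
    (total : Int) (p : Int × Char) : Int :=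
  match (PySem.Dict.mk font_map).get? (String.singleton p.2) with
  | none => total
  | some glyph =>
    if glyph = [] then total
    else
      -- glyph["w"]: Pre_ guarantees the key is present; getD 0 is never the default inside Pre_
      let total' := total + ((PySem.Dict.mk glyph).get? "w").getD 0
      if p.1 < n - 1 then total' + spacing else total'

def measure_bitmap_text (text : String) (font_map : List (String × List (String × Int))) (spacing : Int) : Int :=
  if font_map = [] then 0
  else (PySem.List.enumerate text.toList).foldl
        (mbStepA font_map spacing (text.toList.length : Int)) 0

-- ===== PORT B =====
-- `font_map.items()`: under the assoc-list dict convention (first match wins), the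
-- items of the Python dict are the first occurrence of each key, in order.
def mbItems : List (String × List (String × Int)) → List (String × List (String × Int))
  | [] => []
  | p :: rest => p :: mbItems (rest.filter (fun q => !(q.1 == p.1)))
termination_by l => l.length
decreasing_by
  simp only [List.length_unattach, List.length_cons]
  exact Nat.lt_succ_of_le (le_trans (List.length_filter_le _ _) (by simp))

-- the loop body of B's `for ch, glyph in font_map.items()` (body = text[:-1], lst = text[-1:])
def mbStepB (body lst : List Char) (sp : Int) (total : Int)
    (p : String × List (String × Int)) : Int :=
  match p.1.toList with
  | [c] =>                                     -- `len(ch) != 1 … continue` handled by the match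
    if p.2 = [] then total                     -- `not glyph: continue`
    else
      let nb : Int := (body.count c : Int)
      let nl : Int := (lst.count c : Int)
      if nb ≠ 0 ∨ nl ≠ 0 then
        -- glyph["w"]: only reached when the character occurs in text; Pre_ guarantees "w" present
        total + ((PySem.Dict.mk p.2).get? "w").getD 0 * (nb + nl) + sp * nb
      else total
  | _ => total

def measure_bitmap_text_alt (text : String) (font_map : List (String × List (String × Int))) (spacing : Int) : Int :=
  if font_map = [] then 0
  else
    let cs := text.toList
    (mbItems font_map).foldl (mbStepB cs.dropLast (cs.drop (cs.length - 1)) spacing) 0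

-- ===== PRECONDITION & SPEC =====
-- Pre_ excludes exactly the inputs on which Python A (and B) raises KeyError: a character
-- of text whose (first-match) glyph dict is non-empty but has no "w" key.
def Pre_measure_bitmap_text (text : String) (font_map : List (String × List (String × Int))) (spacing : Int) : Prop :=
  text.toList.all (fun c =>
    match (PySem.Dict.mk font_map).get? (String.singleton c) with
    | none => true
    | some g => g.isEmpty || (PySem.Dict.mk g).contains "w") = true

instance (text : String) (font_map : List (String × List (String × Int))) (spacing : Int) : Decidable (Pre_measure_bitmap_text text font_map spacing) := by unfold Pre_measure_bitmap_text; infer_instance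

def pvWitness_measure_bitmap_text : String × (List (String × List (String × Int))) × Int :=
  ("ab", [("a", [("w", 5)]), ("b", [])], 2)

def Spec_measure_bitmap_text (text : String) (font_map : List (String × List (String × Int))) (spacing : Int) (out : Int) : Prop := out = measure_bitmap_text_alt text font_map spacing
instance (text : String) (font_map : List (String × List (String × Int))) (spacing : Int) (out : Int) : Decidable (Spec_measure_bitmap_text text font_map spacing out) := by unfold Spec_measure_bitmap_text; infer_instance

-- ===== CLAIM (what is proved, stated in full; the proofs are below) =====
def Claim_equal_measure_bitmap_text : Prop := ∀ (text : String) (font_map : List (String × List (String × Int))) (spacing : Int), Dom_measure_bitmap_text text font_map spacing → Pre_measure_bitmap_text text font_map spacing → Spec_measure_bitmap_text text font_map spacing (measure_bitmap_text text font_map spacing)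

-- ===== LEMMAS AND PROOFS =====

-- truthiness of font_map.get(ch)
def mbPresent (font_map : List (String × List (String × Int))) (c : Char) : Bool :=
  match (PySem.Dict.mk font_map).get? (String.singleton c) with
  | none => false
  | some g => !g.isEmpty

-- glyph["w"] of a glyph value
def mbW (g : List (String × Int)) : Int := ((PySem.Dict.mk g).get? "w").getD 0

-- the per-character contribution of a glyph lookup, weighted by φ
def mbLook (font_map : List (String × List (String × Int))) (φ : List (String × Int) → Int) (c : Char) : Int :=
  match (PySem.Dict.mk font_map).get? (String.singleton c) with
  | none => 0
  | some g => if g = [] then 0 else φ g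

-- per-entry pieces of B's loop body
def mbPhi (φ : List (String × Int) → Int) (p : String × List (String × Int)) : Int :=
  match p.1.toList with
  | [_] => if p.2 = [] then 0 else φ p.2
  | _ => 0

def mbCnt (l : List Char) (p : String × List (String × Int)) : Int :=
  match p.1.toList with
  | [c] => (l.count c : Int)
  | _ => 0

theorem mbItems_sublist (l : List (String × List (String × Int))) : (mbItems l).Sublist l := by
  induction l using mbItems.induct with
  | case1 => simp [mbItems]
  | case2 p rest ih =>
    simp only [List.unattach_filter, List.unattach_attach] at ih
    rw [mbItems]
    exact (ih.trans List.filter_sublist).cons₂ p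

-- first-match lookup is unchanged by filtering away a DIFFERENT key
theorem mb_get?_filter (rest : List (String × List (String × Int))) (k0 : String) (c : Char)
    (h : String.singleton c ≠ k0) :
    (PySem.Dict.mk (rest.filter (fun q => !(q.1 == k0)))).get? (String.singleton c)
      = (PySem.Dict.mk rest).get? (String.singleton c) := by
  induction rest with
  | nil => rfl
  | cons q rest ih =>
    by_cases hq : q.1 = k0
    · have hne : (k0 == String.singleton c) = false := by
        simp; exact fun hh => h hh.symm
      simp only [List.filter_cons]
      rw [PySem.Dict.get?_mk_cons]
      simp [hq, hne, ih]
    · simp only [List.filter_cons]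
      rw [if_pos (by simp [hq])]
      rw [PySem.Dict.get?_mk_cons, PySem.Dict.get?_mk_cons]
      by_cases hqc : q.1 == String.singleton c
      · simp [hqc]
      · simp [hqc, ih]

-- summing a single key's φ-weight over the dict's items IS the first-match lookup
theorem mb_sum_items_single (fm : List (String × List (String × Int)))
    (φ : List (String × Int) → Int) (c : Char) :
    ((mbItems fm).map (fun p => if p.1 = String.singleton c then mbPhi φ p else 0)).sum
      = mbLook fm φ c := by
  induction fm using mbItems.induct with
  | case1 => simp [mbItems, mbLook]; rfl
  | case2 p rest ih =>
    simp only [List.unattach_filter, List.unattach_attach] at ih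
    rw [mbItems]
    simp only [List.map_cons, List.sum_cons]
    by_cases hk : p.1 = String.singleton c
    · rw [if_pos hk]
      have hzero :
          ((mbItems (rest.filter (fun q => !(q.1 == p.1)))).map
            (fun q => if q.1 = String.singleton c then mbPhi φ q else 0)).sum = 0 := by
        apply List.sum_eq_zero
        intro x hx
        obtain ⟨q, hq, rfl⟩ := List.mem_map.mp hx
        have hq' : q ∈ rest.filter (fun q => !(q.1 == p.1)) :=
          (mbItems_sublist _).mem hq
        have : ¬ q.1 = String.singleton c := by
          have := (List.mem_filter.mp hq').2
          simp at this
          rw [hk] at this; exact this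
        simp [this]
      rw [hzero, add_zero]
      unfold mbLook
      rw [PySem.Dict.get?_mk_cons, if_pos (by simp [hk])]
      unfold mbPhi
      rw [hk, String.toList_singleton]
    · rw [if_neg hk, zero_add]
      rw [ih]
      unfold mbLook
      rw [mb_get?_filter rest p.1 c (fun hh => hk hh.symm)]
      rw [PySem.Dict.get?_mk_cons,
        if_neg (by simp; exact hk)]

-- summing B's per-entry 'count * weight' over the dict equals summing lookups over the characters
theorem mb_sum_swap (fm : List (String × List (String × Int)))
    (φ : List (String × Int) → Int) (l : List Char) :
    ((mbItems fm).map (fun p => mbCnt l p * mbPhi φ p)).sum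
      = (l.map (mbLook fm φ)).sum := by
  induction l with
  | nil =>
    simp only [List.map_nil, List.sum_nil]
    apply List.sum_eq_zero
    intro x hx
    obtain ⟨p, _, rfl⟩ := List.mem_map.mp hx
    unfold mbCnt
    rcases hp : p.1.toList with _ | ⟨d, _ | _⟩ <;> simp
  | cons c rest ih =>
    have hsplit : ∀ p : String × List (String × Int),
        mbCnt (c :: rest) p * mbPhi φ p
          = mbCnt rest p * mbPhi φ p
            + (if p.1 = String.singleton c then mbPhi φ p else 0) := by
      intro p
      unfold mbCnt
      rcases hp : p.1.toList with _ | ⟨d, _ | _⟩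
      · have hne : ¬ p.1 = String.singleton c := by
          intro hh; rw [hh, String.toList_singleton] at hp; cases hp
        simp [hne]
      · have hiff : p.1 = String.singleton c ↔ d = c := by
          constructor
          · intro hh; rw [hh, String.toList_singleton] at hp
            injection hp with h1 _; exact h1.symm
          · intro hh
            apply String.toList_inj.mp
            rw [hp, String.toList_singleton, hh]
        dsimp only
        by_cases hd : d = c
        · rw [if_pos (hiff.mpr hd), hd, List.count_cons_self]
          push_cast; ring
        · rw [if_neg (fun hh => hd (hiff.mp hh))]
          simp only [List.count_cons]
          rw [if_neg (by simp; exact fun hh => hd hh.symm)]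
          push_cast; ring
      · have hne : ¬ p.1 = String.singleton c := by
          intro hh; rw [hh, String.toList_singleton] at hp; cases hp
        simp [hne]
    calc ((mbItems fm).map (fun p => mbCnt (c :: rest) p * mbPhi φ p)).sum
        = ((mbItems fm).map (fun p => mbCnt rest p * mbPhi φ p
            + (if p.1 = String.singleton c then mbPhi φ p else 0))).sum := by
          congr 1; exact List.map_congr_left (fun p _ => hsplit p)
      _ = ((mbItems fm).map (fun p => mbCnt rest p * mbPhi φ p)).sum
            + ((mbItems fm).map (fun p => if p.1 = String.singleton c then mbPhi φ p else 0)).sum := by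
          rw [← List.sum_map_add]
      _ = (rest.map (mbLook fm φ)).sum + mbLook fm φ c := by
          rw [ih, mb_sum_items_single]
      _ = ((c :: rest).map (mbLook fm φ)).sum := by
          simp [List.map_cons, List.sum_cons]; ring

-- B's loop body adds a fixed per-entry contribution
theorem mbStepB_add (body lst : List Char) (sp t : Int) (p : String × List (String × Int)) :
    mbStepB body lst sp t p = t + mbStepB body lst sp 0 p := by
  unfold mbStepB
  rcases p.1.toList with _ | ⟨c, _ | _⟩ <;> simp <;> split_ifs <;> ring

-- B's per-entry contribution, split into the two count*weight pieces
theorem mbStepB_zero (body lst : List Char) (sp : Int) (p : String × List (String × Int)) :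
    mbStepB body lst sp 0 p
      = mbCnt body p * mbPhi (fun g => mbW g + sp) p + mbCnt lst p * mbPhi mbW p := by
  unfold mbStepB mbCnt mbPhi mbW
  rcases p.1.toList with _ | ⟨c, _ | _⟩ <;> simp
  split_ifs with h1 h2
  · ring
  · ring
  · rw [not_or] at h2
    obtain ⟨h3, h4⟩ := h2
    simp only [not_not] at h3 h4
    simp [h3, h4]

-- the lookup weighted by (w + sp) splits into the w-lookup plus sp per present glyph
theorem mbLook_add_sp (fm : List (String × List (String × Int))) (sp : Int) (l : List Char) :
    (l.map (mbLook fm (fun g => mbW g + sp))).sum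
      = (l.map (mbLook fm mbW)).sum + sp * (l.countP (mbPresent fm) : Int) := by
  induction l with
  | nil => simp
  | cons c rest ih =>
    simp only [List.map_cons, List.sum_cons, List.countP_cons]
    rw [ih]
    have : mbLook fm (fun g => mbW g + sp) c
        = mbLook fm mbW c + sp * (if mbPresent fm c then (1 : Int) else 0) := by
      unfold mbLook mbPresent
      cases hg : (PySem.Dict.mk fm).get? (String.singleton c) with
      | none => simp
      | some g =>
        by_cases hge : g = []
        · simp [hge]
        · have : g.isEmpty = false := by simp [hge]
          simp [hge, this]
    rw [this]
    by_cases hp : mbPresent fm c <;> simp [hp] <;> push_cast <;> ring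

-- A's filtered width sum IS the per-character w-lookup sum
theorem mb_width_eq_look (fm : List (String × List (String × Int))) (l : List Char) :
    ((l.filter (mbPresent fm)).map
        (fun c => ((PySem.Dict.mk (((PySem.Dict.mk fm).get? (String.singleton c)).getD [])).get? "w").getD 0)).sum
      = (l.map (mbLook fm mbW)).sum := by
  induction l with
  | nil => simp
  | cons c rest ih =>
    simp only [List.filter_cons, List.map_cons, List.sum_cons]
    have hlook : mbLook fm mbW c
        = if mbPresent fm c then
            ((PySem.Dict.mk (((PySem.Dict.mk fm).get? (String.singleton c)).getD [])).get? "w").getD 0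
          else 0 := by
      unfold mbLook mbPresent mbW
      cases hg : (PySem.Dict.mk fm).get? (String.singleton c) with
      | none => simp
      | some g =>
        by_cases hge : g = []
        · simp [hge]
        · have : g.isEmpty = false := by simp [hge]
          simp [hge, this]
    by_cases hp : mbPresent fm c
    · simp only [hp, if_pos, List.map_cons, List.sum_cons]
      rw [ih, hlook, if_pos hp]
    · simp only [hp, Bool.false_eq_true, if_false]
      rw [ih, hlook, if_neg hp]
      ring

-- A's interleaved loop computes width + spacing * (present glyphs before the last index)
theorem mb_loop (fm : List (String × List (String × Int))) (sp n : Int) :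
    ∀ (l : List Char) (s t : Int), s + (l.length : Int) = n →
      (PySem.List.enumerate l s).foldl (mbStepA fm sp n) t
        = t + ((l.filter (mbPresent fm)).map
                (fun c => ((PySem.Dict.mk (((PySem.Dict.mk fm).get? (String.singleton c)).getD [])).get? "w").getD 0)).sum
            + sp * (l.dropLast.countP (mbPresent fm) : Int) := by
  intro l
  induction l with
  | nil => intro s t h; simp [PySem.List.enumerate]
  | cons c rest ih =>
    intro s t h
    rw [PySem.List.enumerate_cons, List.foldl_cons]
    have hrec := ih (s + 1) (mbStepA fm sp n t (s, c))
        (by simp only [List.length_cons] at h; push_cast at h ⊢; omega)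
    rw [hrec]
    have hdrop : (c :: rest).dropLast
        = if rest = [] then ([] : List Char) else c :: rest.dropLast := by
      cases rest <;> simp
    set w := ((PySem.Dict.mk (((PySem.Dict.mk fm).get? (String.singleton c)).getD [])).get? "w").getD 0 with hw
    by_cases hp : mbPresent fm c = true
    · have hstep : mbStepA fm sp n t (s, c)
          = if rest = [] then t + w else t + w + sp := by
        unfold mbStepA
        unfold mbPresent at hp
        cases hg : (PySem.Dict.mk fm).get? (String.singleton c) with
        | none => rw [hg] at hp; simp at hp
        | some g =>
          rw [hg] at hp
          dsimp only at hp ⊢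
          simp only [Bool.not_eq_true'] at hp
          have hge : ¬ g = [] := by
            intro hgnil; rw [hgnil] at hp; simp at hp
          simp only [hge, if_false]
          have hcond : (s < n - 1) ↔ ¬ rest = [] := by
            simp only [List.length_cons] at h
            push_cast at h
            constructor
            · intro hlt hnil; rw [hnil] at h; simp at h; omega
            · intro hnil
              have : (rest.length : Int) ≥ 1 := by
                cases rest with
                | nil => exact absurd rfl hnil
                | cons a b => simp
              omega
          by_cases hr : rest = []
          · simp only [hr, if_true]
            have : ¬ s < n - 1 := by rw [hcond]; simp [hr]
            simp only [this, if_false]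
            rw [hw, hg]; rfl
          · simp only [hr, if_false]
            have : s < n - 1 := hcond.mpr hr
            simp only [this, if_true]
            rw [hw, hg]; rfl
      rw [hstep, hdrop]
      by_cases hr : rest = [] <;>
        simp [hr, hp] <;> ring
    · have hstep : mbStepA fm sp n t (s, c) = t := by
        unfold mbStepA
        unfold mbPresent at hp
        cases hg : (PySem.Dict.mk fm).get? (String.singleton c) with
        | none => rfl
        | some g =>
          rw [hg] at hp
          dsimp only at hp ⊢
          simp only [Bool.not_eq_true', Bool.not_eq_false] at hp
          have : g = [] := by
            cases g with
            | nil => rfl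
            | cons a b => simp [List.isEmpty] at hp
          simp [this]
      rw [hstep, hdrop]
      by_cases hr : rest = [] <;>
        simp [hr, hp]

-- ===== VERDICT (by name: the statement is the Claim_ definition above) =====
theorem measure_bitmap_text_spec : Claim_equal_measure_bitmap_text := by
  intro text font_map spacing _ _
  unfold Spec_measure_bitmap_text measure_bitmap_text measure_bitmap_text_alt
  by_cases hfm : font_map = []
  · simp [hfm]
  · simp only [hfm, if_false]
    set cs := text.toList with hcs
    -- B's fold = sum of its per-entry contributions
    have hcongr : (mbItems font_map).foldl
        (mbStepB cs.dropLast (cs.drop (cs.length - 1)) spacing) 0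
        = (mbItems font_map).foldl
          (fun acc p => acc + mbStepB cs.dropLast (cs.drop (cs.length - 1)) spacing 0 p) 0 :=
      PySem.List.foldl_congr_mem _ _ _ _ (fun acc p _ => mbStepB_add _ _ _ _ _)
    rw [hcongr, PySem.List.foldl_add, zero_add]
    -- split each contribution, push the sums through the dict, and swap to per-character sums
    have hB : ((mbItems font_map).map
          (mbStepB cs.dropLast (cs.drop (cs.length - 1)) spacing 0)).sum
        = (cs.dropLast.map (mbLook font_map (fun g => mbW g + spacing))).sum
          + ((cs.drop (cs.length - 1)).map (mbLook font_map mbW)).sum := by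
      calc ((mbItems font_map).map
              (mbStepB cs.dropLast (cs.drop (cs.length - 1)) spacing 0)).sum
          = ((mbItems font_map).map (fun p =>
              mbCnt cs.dropLast p * mbPhi (fun g => mbW g + spacing) p
                + mbCnt (cs.drop (cs.length - 1)) p * mbPhi mbW p)).sum := by
            congr 1
            exact List.map_congr_left (fun p _ => mbStepB_zero _ _ _ p)
        _ = ((mbItems font_map).map (fun p =>
                mbCnt cs.dropLast p * mbPhi (fun g => mbW g + spacing) p)).sum
              + ((mbItems font_map).map (fun p =>
                mbCnt (cs.drop (cs.length - 1)) p * mbPhi mbW p)).sum := by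
            rw [← List.sum_map_add]
        _ = _ := by rw [mb_sum_swap, mb_sum_swap]
    rw [hB, mbLook_add_sp]
    -- A's fold = width over all of cs + spacing * gaps
    rw [mb_loop font_map spacing (cs.length : Int) cs 0 0 (by simp), zero_add]
    rw [mb_width_eq_look]
    -- cs = dropLast ++ last element
    have hsplitcs : cs = cs.dropLast ++ cs.drop (cs.length - 1) := by
      conv_lhs => rw [← List.take_append_drop (cs.length - 1) cs]
      rw [List.dropLast_eq_take]
    have hw : (cs.map (mbLook font_map mbW)).sum
        = (cs.dropLast.map (mbLook font_map mbW)).sum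
          + ((cs.drop (cs.length - 1)).map (mbLook font_map mbW)).sum := by
      conv_lhs => rw [hsplitcs]
      rw [List.map_append, List.sum_append]
    rw [hw]
    ring
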